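-- pv_equiv track=rewrite | github.com/JetStarBlues/Nand-2-Tetris | 1_elementaryGates.py | _orNWay
-- ===== SOURCE A (Python) =====
-- def _or(a,b):
-- 	return (a | b)
--
-- def _orNWay(x):
-- 	# technically, could break once reach a one ...
-- 	#   but is break doable with logic gates???
-- 	out = int( x[0] )
-- 	for i in range(1, len(x)):
-- 		out = _or( out, int( x[i] ) )
-- 	return out
--
-- 	''' alternate way, takes advantage of using gates in parallel
-- 		> speed savings if physical implementation
-- 	    https://github.com/havivha/Nand2Tetris/blob/master/02/Or8Way.hdl
-- 	    t1 = or (in[0], in[1])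
-- 	    t2 = or (in[2], in[3])
-- 	    t3 = or (in[4], in[5])
-- 	    t4 = or (in[6], in[7])
-- 	    t5 = or (t1, t2)
-- 	    t6 = or (t3, t4)
-- 	    t7 = or (t5, t6)
-- 	    return t7  '''
-- ===== SOURCE B (Python) =====
-- def _or(a, b):
-- 	return (a | b)
--
-- def _orNWay(x):
-- 	# divide-and-conquer OR reduction (the parallel gate tree from A's comment)
-- 	n = len(x)
-- 	if n <= 1:
-- 		return int(x[0])
-- 	mid = n // 2
-- 	return _or(_orNWay(x[:mid]), _orNWay(x[mid:]))
-- ===== Notes on version B (the rewrite author's own statement) =====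
-- stated objective: alternative
-- what changed: Replaces the sequential left-fold OR loop by a recursive divide-and-conquer OR reduction that splits the list at the midpoint, mirroring the parallel gate tree sketched in A's own comment.
import Mathlib
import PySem

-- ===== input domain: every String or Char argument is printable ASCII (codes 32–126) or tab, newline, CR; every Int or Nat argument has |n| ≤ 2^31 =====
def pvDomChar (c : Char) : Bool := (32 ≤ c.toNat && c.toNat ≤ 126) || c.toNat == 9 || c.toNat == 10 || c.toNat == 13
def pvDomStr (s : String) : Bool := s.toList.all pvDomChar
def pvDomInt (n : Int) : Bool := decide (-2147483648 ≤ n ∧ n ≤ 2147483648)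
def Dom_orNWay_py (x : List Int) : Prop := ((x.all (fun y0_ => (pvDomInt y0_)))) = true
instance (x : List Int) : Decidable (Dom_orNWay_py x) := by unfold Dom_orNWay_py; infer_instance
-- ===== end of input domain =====

-- B replaces A's sequential left-fold OR loop by a recursive midpoint divide-and-conquer OR
-- reduction (the parallel gate tree from A's own comment); objective: alternative decomposition.
-- Python's 'a | b' on Int is ported as PySem.Int.bor (exact on all ints, two's complement on negatives).

-- ===== PORT A =====
-- out = int(x[0]); for i in range(1, len(x)): out = _or(out, int(x[i])); return out
-- x[0] raises IndexError on []; Pre_ excludes that input, so the match default 0 in the [] case is never used.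
def orNWay_py (x : List Int) : Int :=
  match x with
  | [] => 0
  | h :: t => t.foldl (fun out xi => PySem.Int.bor out xi) h

-- ===== PORT B =====
-- n = len(x); if n <= 1: return int(x[0]); mid = n // 2; return _or(_orNWay(x[:mid]), _orNWay(x[mid:]))
-- n, mid are nonnegative, so Nat length and Nat division are exactly Python's len and //.
-- x[0] raises on []; that input is outside Pre_, so the getD default 0 is never used.
-- structural recursion on a fuel ≥ len(x) (a totality guard only; the fuel never runs out on any input)
def orNWayGo (fuel : Nat) (x : List Int) : Int :=
  match fuel with
  | 0 => 0
  | fuel + 1 =>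
    if x.length ≤ 1 then (PySem.List.pyGet? x 0).getD 0
    else
      PySem.Int.bor (orNWayGo fuel (PySem.List.slice x none (some ((x.length / 2 : Nat) : Int))))
                    (orNWayGo fuel (PySem.List.slice x (some ((x.length / 2 : Nat) : Int)) none))

def orNWay_py_alt (x : List Int) : Int := orNWayGo x.length x

-- ===== PRECONDITION & SPEC =====
-- Pre_ excludes only the empty list, on which the Python A raises IndexError at x[0] (B raises there too).
def Pre_orNWay_py (x : List Int) : Prop := x ≠ []
instance (x : List Int) : Decidable (Pre_orNWay_py x) := by unfold Pre_orNWay_py; infer_instance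
def pvWitness_orNWay_py : List Int := ([3, 4, 8])
def Spec_orNWay_py (x : List Int) (out : Int) : Prop := out = orNWay_py_alt x
instance (x : List Int) (out : Int) : Decidable (Spec_orNWay_py x out) := by unfold Spec_orNWay_py; infer_instance

-- ===== CLAIM (what is proved, stated in full; the proofs are below) =====
def Claim_equal_orNWay_py : Prop := ∀ (x : List Int), Dom_orNWay_py x → Pre_orNWay_py x → Spec_orNWay_py x (orNWay_py x)

-- ===== LEMMAS AND PROOFS =====

theorem pv_ldiff_add_and (n : Nat) : ∀ m : Nat, Nat.ldiff n m + (n &&& m) = n := by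
  induction n using Nat.strong_induction_on with
  | _ n ih =>
    intro m
    rcases Nat.eq_zero_or_pos n with h0 | hpos
    · subst h0
      have hl : Nat.ldiff 0 m = 0 := by
        apply Nat.eq_of_testBit_eq
        intro i
        simp [Nat.testBit_ldiff]
      simp [hl]
    · have hdiv : n / 2 < n := Nat.div_lt_self hpos (by norm_num)
      have ihm := ih (n / 2) hdiv (m / 2)
      have hld : Nat.ldiff n m / 2 = Nat.ldiff (n / 2) (m / 2) := by
        have h := @Nat.bitwise_div_two_pow (fun b b' => b && !b') n m 1 (by simp)
        simpa [Nat.ldiff, pow_one] using h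
      have hla : (n &&& m) / 2 = n / 2 &&& m / 2 := Nat.and_div_two
      have e1 : (Nat.ldiff n m % 2 = 1) ↔ (n % 2 = 1 ∧ ¬ m % 2 = 1) := by
        have h := Nat.testBit_ldiff n m 0
        rw [Nat.testBit_zero, Nat.testBit_zero, Nat.testBit_zero] at h
        have h' : (decide (Nat.ldiff n m % 2 = 1) = true)
            ↔ ((decide (n % 2 = 1) && !decide (m % 2 = 1)) = true) := by rw [h]
        simpa using h'
      have e2 : ((n &&& m) % 2 = 1) ↔ (n % 2 = 1 ∧ m % 2 = 1) := by
        have h := Nat.testBit_and n m 0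
        rw [Nat.testBit_zero, Nat.testBit_zero, Nat.testBit_zero] at h
        have h' : (decide ((n &&& m) % 2 = 1) = true)
            ↔ ((decide (n % 2 = 1) && decide (m % 2 = 1)) = true) := by rw [h]
        simpa using h'
      omega

theorem pv_sub_and_eq_ldiff (n m : Nat) : n - (n &&& m) = Nat.ldiff n m := by
  have := pv_ldiff_add_and n m
  omega

theorem int_lor_assoc (a b c : Int) :
    Int.lor (Int.lor a b) c = Int.lor a (Int.lor b c) := by
  cases a with
  | ofNat ma => cases b with
    | ofNat mb => cases c with
      | ofNat mc => simp [Int.lor, Nat.lor_assoc]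
      | negSucc mc =>
        simp only [Int.lor, Int.negSucc.injEq]
        apply Nat.eq_of_testBit_eq; intro i
        simp only [Nat.testBit_ldiff, Nat.testBit_lor]
        cases ma.testBit i <;> cases mb.testBit i <;> cases mc.testBit i <;> rfl
    | negSucc mb => cases c with
      | ofNat mc =>
        simp only [Int.lor, Int.negSucc.injEq]
        apply Nat.eq_of_testBit_eq; intro i
        simp only [Nat.testBit_ldiff]
        cases ma.testBit i <;> cases mb.testBit i <;> cases mc.testBit i <;> rfl
      | negSucc mc =>
        simp only [Int.lor, Int.negSucc.injEq]
        apply Nat.eq_of_testBit_eq; intro i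
        simp only [Nat.testBit_ldiff, Nat.testBit_and]
        cases ma.testBit i <;> cases mb.testBit i <;> cases mc.testBit i <;> rfl
  | negSucc ma => cases b with
    | ofNat mb => cases c with
      | ofNat mc =>
        simp only [Int.lor, Int.negSucc.injEq]
        apply Nat.eq_of_testBit_eq; intro i
        simp only [Nat.testBit_ldiff, Nat.testBit_lor]
        cases ma.testBit i <;> cases mb.testBit i <;> cases mc.testBit i <;> rfl
      | negSucc mc =>
        simp only [Int.lor, Int.negSucc.injEq]
        apply Nat.eq_of_testBit_eq; intro i
        simp only [Nat.testBit_ldiff, Nat.testBit_and]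
        cases ma.testBit i <;> cases mb.testBit i <;> cases mc.testBit i <;> rfl
    | negSucc mb => cases c with
      | ofNat mc =>
        simp only [Int.lor, Int.negSucc.injEq]
        apply Nat.eq_of_testBit_eq; intro i
        simp only [Nat.testBit_ldiff, Nat.testBit_and]
        cases ma.testBit i <;> cases mb.testBit i <;> cases mc.testBit i <;> rfl
      | negSucc mc => simp [Int.lor, Nat.land_assoc]

theorem pv_bor_eq_lor (a b : Int) : PySem.Int.bor a b = Int.lor a b := by
  cases a with
  | ofNat ma => cases b with
    | ofNat mb => simp [PySem.Int.bor, Int.lor]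
    | negSucc mb =>
      simp [PySem.Int.bor, Int.lor, Int.negSucc_eq, pv_sub_and_eq_ldiff]
      split_ifs <;> omega
  | negSucc ma => cases b with
    | ofNat mb =>
      simp [PySem.Int.bor, Int.lor, Int.negSucc_eq, pv_sub_and_eq_ldiff]
      split_ifs <;> omega
    | negSucc mb =>
      simp [PySem.Int.bor, Int.lor, Int.negSucc_eq]
      split_ifs <;> omega

theorem pv_bor_assoc (a b c : Int) :
    PySem.Int.bor (PySem.Int.bor a b) c = PySem.Int.bor a (PySem.Int.bor b c) := by
  simp only [pv_bor_eq_lor]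
  exact int_lor_assoc a b c

theorem pv_zero_bor (a : Int) : PySem.Int.bor 0 a = a := by
  rw [PySem.Int.bor_comm]
  exact PySem.Int.bor_zero a

theorem foldl_lor_start (t : List Int) (a : Int) :
    t.foldl (fun out xi => PySem.Int.bor out xi) a
      = PySem.Int.bor a (t.foldl (fun out xi => PySem.Int.bor out xi) 0) := by
  induction t generalizing a with
  | nil => simp
  | cons h t ih =>
    simp only [List.foldl_cons]
    rw [ih (PySem.Int.bor a h), ih (PySem.Int.bor 0 h)]
    rw [pv_bor_assoc, pv_zero_bor]

-- A's value rewritten as a fold from 0 over the whole list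
theorem orNWay_py_eq_fold (x : List Int) (hx : x ≠ []) :
    orNWay_py x = x.foldl (fun out xi => PySem.Int.bor out xi) 0 := by
  cases x with
  | nil => exact absurd rfl hx
  | cons h t =>
    simp only [orNWay_py, List.foldl_cons]
    rw [pv_zero_bor]

-- B's value equals the same fold, by induction on the fuel
theorem orNWayGo_eq_fold (fuel : Nat) (x : List Int) (hx : x ≠ []) (hf : x.length ≤ fuel) :
    orNWayGo fuel x = x.foldl (fun out xi => PySem.Int.bor out xi) 0 := by
  induction fuel generalizing x with
  | zero =>
    have := List.length_pos_of_ne_nil hx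
    omega
  | succ fuel ih =>
    rw [orNWayGo]
    by_cases h1 : x.length ≤ 1
    · rw [if_pos h1]
      cases x with
      | nil => exact absurd rfl hx
      | cons a t =>
        cases t with
        | nil => simp [pv_zero_bor]
        | cons b u => simp at h1
    · rw [if_neg h1]
      have hn : 2 ≤ x.length := by omega
      have htake : PySem.List.slice x none (some ((x.length / 2 : Nat) : Int))
          = x.take (x.length / 2) := PySem.List.slice_to_natCast x _
      have hdrop : PySem.List.slice x (some ((x.length / 2 : Nat) : Int)) none
          = x.drop (x.length / 2) := PySem.List.slice_from_natCast x _
      have ht : x.take (x.length / 2) ≠ [] := by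
        intro h
        rcases List.take_eq_nil_iff.mp h with h' | h'
        · omega
        · exact hx h'
      have hd : x.drop (x.length / 2) ≠ [] := by
        simp only [Ne, List.drop_eq_nil_iff]
        omega
      have hft : (x.take (x.length / 2)).length ≤ fuel := by
        simp only [List.length_take]
        omega
      have hfd : (x.drop (x.length / 2)).length ≤ fuel := by
        simp only [List.length_drop]
        omega
      rw [htake, hdrop, ih _ ht hft, ih _ hd hfd]
      conv_rhs => rw [← List.take_append_drop (x.length / 2) x]
      rw [List.foldl_append]
      exact (foldl_lor_start _ _).symm

-- ===== VERDICT (by name: the statement is the Claim_ definition above) =====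
theorem orNWay_py_spec : Claim_equal_orNWay_py := by
  intro x _ hpre
  unfold Spec_orNWay_py
  rw [orNWay_py_eq_fold x hpre, orNWay_py_alt,
      orNWayGo_eq_fold x.length x hpre le_rfl]
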